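-- pv_equiv track=rewrite | github.com/JayTongue/advent_of_code | 2025/1_2.py | math_method
-- ===== SOURCE A (Python) =====
-- def hits_in_move(pos, direction, steps, ring=100):
--     step = 1 if direction == 'R' else -1
--
--     if step == 1:
--         n0 = (ring - pos) % ring
--     else:
--         n0 = pos % ring
--
--     if n0 == 0:
--         n0 = ring
--
--     if n0 > steps:
--         return 0
--     return 1 + (steps - n0) // ring
--
-- def math_method(data):
--     pos = 50
--     count = 0
--     for direction, steps in data:
--         count += hits_in_move(pos, direction, steps, 100)
--         step = 1 if direction == 'R' else -1
--         pos = (pos + step * steps) % 100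
--     return count
-- ===== SOURCE B (Python) =====
-- def math_method(data):
--     # Phase 1: unwrapped absolute endpoints (no modular reduction while walking).
--     xs = []
--     x = 50
--     for direction, steps in data:
--         x += steps if direction == 'R' else -steps
--         xs.append(x)
--     # Phase 2: crossings of multiples of 100 per segment, as floor differences.
--     count = 0
--     prev = 50
--     for (direction, _), x in zip(data, xs):
--         if direction == 'R':
--             count += max(0, x // 100 - prev // 100)
--         else:
--             count += max(0, (prev - 1) // 100 - (x - 1) // 100)
--         prev = x
--     return count
-- ===== Notes on version B (the rewrite author's own statement) =====
-- stated objective: alternative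
-- what changed: B works in unwrapped absolute coordinates in two staged passes: one pass accumulates the absolute (non-modular) endpoint of each move, a second pass counts crossings per segment as clamped floor-quotient differences (multiples of 100 inside the segment), instead of A's single pass that keeps a position mod 100 and calls the branchy distance-to-zero helper hits_in_move per move.
import Mathlib
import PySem

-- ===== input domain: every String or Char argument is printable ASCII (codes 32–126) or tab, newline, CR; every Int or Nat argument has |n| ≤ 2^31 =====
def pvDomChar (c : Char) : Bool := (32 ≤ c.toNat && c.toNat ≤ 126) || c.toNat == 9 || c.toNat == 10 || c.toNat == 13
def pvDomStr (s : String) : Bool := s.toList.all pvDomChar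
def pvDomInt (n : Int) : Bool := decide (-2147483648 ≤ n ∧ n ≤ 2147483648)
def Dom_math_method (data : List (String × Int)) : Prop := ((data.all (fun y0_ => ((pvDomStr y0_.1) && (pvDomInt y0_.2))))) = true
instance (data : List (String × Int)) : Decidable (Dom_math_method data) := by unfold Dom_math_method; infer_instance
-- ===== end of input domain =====

-- ===== PORT A =====
-- B recomputes the count from unwrapped absolute coordinates in two staged passes
-- instead of A's single modular pass with the hits_in_move helper; objective: alternative.
def hits_in_move (pos : Int) (direction : String) (steps : Int) (ring : Int) : Int :=
  let step : Int := if direction = "R" then 1 else -1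
  let n0 : Int := if step = 1 then PySem.Int.mod (ring - pos) ring else PySem.Int.mod pos ring
  let n0 : Int := if n0 = 0 then ring else n0
  if n0 > steps then 0 else 1 + PySem.Int.floordiv (steps - n0) ring

def mathLoopA : List (String × Int) → Int → Int → Int
  | [], _, count => count
  | (direction, steps) :: rest, pos, count =>
      let count := count + hits_in_move pos direction steps 100
      let step : Int := if direction = "R" then 1 else -1
      mathLoopA rest (PySem.Int.mod (pos + step * steps) 100) count

def math_method (data : List (String × Int)) : Int := mathLoopA data 50 0

-- ===== PORT B =====
-- Phase 1 of B: the unwrapped absolute endpoint of each move.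
def pvEndpoints : List (String × Int) → Int → List Int
  | [], _ => []
  | (direction, steps) :: rest, x =>
      let x' := x + (if direction = "R" then steps else -steps)
      x' :: pvEndpoints rest x'

-- Phase 2 of B: fold over zip(data, xs) carrying (count, prev).
def pvCountStep (st : Int × Int) (p : (String × Int) × Int) : Int × Int :=
  let c : Int :=
    if p.1.1 = "R" then
      max 0 (PySem.Int.floordiv p.2 100 - PySem.Int.floordiv st.2 100)
    else
      max 0 (PySem.Int.floordiv (st.2 - 1) 100 - PySem.Int.floordiv (p.2 - 1) 100)
  (st.1 + c, p.2)

def math_method_alt (data : List (String × Int)) : Int :=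
  let xs := pvEndpoints data 50
  ((data.zip xs).foldl pvCountStep (0, 50)).1

-- ===== PRECONDITION & SPEC =====
def Spec_math_method (data : List (String × Int)) (out : Int) : Prop := out = math_method_alt data
instance (data : List (String × Int)) (out : Int) : Decidable (Spec_math_method data out) := by unfold Spec_math_method; infer_instance

-- ===== CLAIM (what is proved, stated in full; the proofs are below) =====
def Claim_equal_math_method : Prop := ∀ (data : List (String × Int)), Dom_math_method data → Spec_math_method data (math_method data)

-- ===== LEMMAS AND PROOFS =====
lemma mod100 (x : Int) : PySem.Int.mod x 100 = x % 100 :=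
  PySem.Int.mod_eq_emod_of_pos (by norm_num)

lemma fdiv100 (x : Int) : PySem.Int.floordiv x 100 = x / 100 :=
  PySem.Int.floordiv_eq_ediv_of_pos (by norm_num)

lemma hits_R (x s : Int) :
    hits_in_move (x % 100) "R" s 100 = max 0 ((x + s) / 100 - x / 100) := by
  simp only [hits_in_move, mod100, fdiv100, max_def]
  split_ifs <;> omega

lemma hits_L (x s : Int) (d : String) (hd : d ≠ "R") :
    hits_in_move (x % 100) d s 100 = max 0 ((x - 1) / 100 - (x + -s - 1) / 100) := by
  simp only [hits_in_move, if_neg hd, mod100, fdiv100, max_def]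
  norm_num
  split_ifs <;> omega

lemma loop_eq : ∀ (data : List (String × Int)) (x count : Int),
    mathLoopA data (x % 100) count
      = ((data.zip (pvEndpoints data x)).foldl pvCountStep (count, x)).1
  | [], _, _ => rfl
  | (d, s) :: rest, x, count => by
      simp only [mathLoopA, pvEndpoints, List.zip_cons_cons, List.foldl_cons]
      by_cases hd : d = "R"
      · subst hd
        simp only [reduceIte, pvCountStep, hits_R, one_mul, mod100, fdiv100]
        have h1 : (x % 100 + s) % 100 = (x + s) % 100 := by omega
        rw [h1, loop_eq rest (x + s) _]
      · simp only [if_neg hd, pvCountStep, hits_L x s d hd, mod100, fdiv100]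
        have h1 : (x % 100 + -1 * s) % 100 = (x + -s) % 100 := by omega
        rw [h1, loop_eq rest (x + -s) _]

-- ===== VERDICT (by name: the statement is the Claim_ definition above) =====
theorem math_method_spec : Claim_equal_math_method := by
  intro data _
  unfold Spec_math_method math_method math_method_alt
  have h : mathLoopA data 50 0 = mathLoopA data (50 % 100) 0 := by norm_num
  rw [h, loop_eq data 50 0]
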